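-- pv_equiv track=rewrite | github.com/tushargururaj/Encryption-Decryption-Tool | Decrypter/index.py | sequenceFinder
-- ===== SOURCE A (Python) =====
-- def sequenceFinder(string,key):
--     index = string.find(key)
--     string = string[0:index - 1]
--     string = string
--     characters = "/?#&$"
--     for char in characters:
--         string = string.replace(char, "_")
--
--     split_list = string.split("_")
--     cleaned_list = [item for item in split_list if item]
--     return cleaned_list
-- ===== SOURCE B (Python) =====
-- def sequenceFinder(string, key):
--     index = string.find(key)
--     s = string[0:index - 1]
--     delims = set("/?#&$_")
--     tokens = []
--     buf = []
--     for ch in s: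
--         if ch in delims:
--             if buf:
--                 tokens.append("".join(buf))
--                 buf = []
--         else:
--             buf.append(ch)
--     if buf:
--         tokens.append("".join(buf))
--     return tokens
-- ===== Notes on version B (the rewrite author's own statement) =====
-- stated objective: alternative
-- what changed: Replaces the five sequential str.replace passes plus split('_') plus filter by a single left-to-right pass over the sliced string with a token buffer that is flushed at every delimiter character.
import Mathlib
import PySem

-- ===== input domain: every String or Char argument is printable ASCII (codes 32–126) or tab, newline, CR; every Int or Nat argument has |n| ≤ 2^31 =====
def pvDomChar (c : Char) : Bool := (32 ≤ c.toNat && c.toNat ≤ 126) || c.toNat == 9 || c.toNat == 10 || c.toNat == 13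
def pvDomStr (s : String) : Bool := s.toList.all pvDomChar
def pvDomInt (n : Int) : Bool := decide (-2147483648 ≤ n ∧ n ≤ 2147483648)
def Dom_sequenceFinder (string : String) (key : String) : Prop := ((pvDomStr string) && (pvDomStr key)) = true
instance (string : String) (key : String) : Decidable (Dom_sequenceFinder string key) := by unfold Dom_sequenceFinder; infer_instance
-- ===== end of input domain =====

-- B replaces the replace-chain + split + filter by one pass with a token buffer; objective: alternative decomposition (same value, same slice quirk).

-- ===== PORT A =====
def sequenceFinder (string : String) (key : String) : List String :=
  let index := PySem.Str.find string key
  let s1 := PySem.Str.slice string (some 0) (some (index - 1))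
  let s2 := ("/?#&$".toList).foldl (fun s c => PySem.Str.replace s (String.ofList [c]) "_") s1
  let split_list := (PySem.Str.split? s2 "_").getD []
  split_list.filter (fun item => !item.isEmpty)

-- ===== PORT B =====
def pvIsDelim (c : Char) : Bool := c ∈ "/?#&$_".toList

-- one pass: flush the buffer at each delimiter, keep non-empty tokens
def pvTok (cs : List Char) (buf : List Char) : List String :=
  match cs with
  | [] => if buf = [] then [] else [String.ofList buf]
  | c :: rest =>
    if pvIsDelim c then
      (if buf = [] then pvTok rest [] else String.ofList buf :: pvTok rest [])
    else pvTok rest (buf ++ [c])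

def sequenceFinder_alt (string : String) (key : String) : List String :=
  let index := PySem.Str.find string key
  let s := PySem.Str.slice string (some 0) (some (index - 1))
  pvTok s.toList []

-- ===== PRECONDITION & SPEC =====
def Spec_sequenceFinder (string : String) (key : String) (out : List String) : Prop := out = sequenceFinder_alt string key
instance (string : String) (key : String) (out : List String) : Decidable (Spec_sequenceFinder string key out) := by unfold Spec_sequenceFinder; infer_instance

-- ===== CLAIM (what is proved, stated in full; the proofs are below) =====
def Claim_equal_sequenceFinder : Prop := ∀ (string : String) (key : String), Dom_sequenceFinder string key → Spec_sequenceFinder string key (sequenceFinder string key)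

-- ===== LEMMAS AND PROOFS =====

-- the per-character substitution A's replace-chain performs
def pvMapG (c : Char) : Char := if pvIsDelim c then '_' else c

-- splitting on a single char, structurally
def pvSplitChar (u : Char) : List Char → List (List Char)
  | [] => [[]]
  | c :: rest => if c = u then [] :: pvSplitChar u rest
                 else (pvSplitChar u rest).modifyHead (c :: ·)

def pvConsHead (pre : List Char) : List (List Char) → List (List Char)
  | [] => [pre]
  | h :: t => (pre ++ h) :: t

lemma pvSplitChar_ne_nil (u : Char) (l : List Char) : pvSplitChar u l ≠ [] := by
  cases l with
  | nil => simp [pvSplitChar]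
  | cons c rest =>
    simp only [pvSplitChar]
    split_ifs
    · simp
    · cases h : pvSplitChar u rest with
      | nil => exact absurd h (pvSplitChar_ne_nil u rest)
      | cons a t => simp

lemma pvConsHead_nil (l : List (List Char)) (h : l ≠ []) : pvConsHead [] l = l := by
  cases l with
  | nil => exact absurd rfl h
  | cons a t => simp [pvConsHead]

-- Chars.replace with a one-char pattern is a map
lemma replace_go_single (a b : Char) :
    ∀ (fuel : Nat) (l acc : List Char), l.length ≤ fuel →
      PySem.Chars.replace.go [a] [b] fuel l acc
        = acc.reverse ++ l.map (fun c => if c = a then b else c) := by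
  intro fuel
  induction fuel with
  | zero =>
    intro l acc h
    have : l = [] := by cases l <;> simp_all
    subst this; simp [PySem.Chars.replace.go]
  | succ n ih =>
    intro l acc h
    cases l with
    | nil => simp [PySem.Chars.replace.go]
    | cons c t =>
      simp only [List.length_cons] at h
      by_cases hc : c = a
      · subst hc
        have hpre : [c].isPrefixOf (c :: t) = true := by simp [List.isPrefixOf]
        simp only [PySem.Chars.replace.go, hpre, if_true, List.length_singleton, List.drop_one,
          List.tail_cons]
        rw [ih t ([b].reverse ++ acc) (by omega)]
        simp
      · have hpre : [a].isPrefixOf (c :: t) = false := by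
          simp only [List.isPrefixOf, Bool.and_true, beq_eq_false_iff_ne,
            ne_eq]
          exact fun h' => hc h'.symm
        simp only [PySem.Chars.replace.go, hpre, Bool.false_eq_true, if_false]
        rw [ih t (c :: acc) (by omega)]
        simp [hc]

lemma replace_single (a b : Char) (s : List Char) :
    PySem.Chars.replace s [a] [b] = s.map (fun c => if c = a then b else c) := by
  have h := replace_go_single a b s.length s [] le_rfl
  simpa [PySem.Chars.replace] using h

-- splitOn with a one-char separator is pvSplitChar (with the running chunk prepended)
lemma splitOn_go_single (u : Char) :
    ∀ (fuel : Nat) (l cur : List Char) (acc : List (List Char)), l.length < fuel →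
      PySem.Chars.splitOn.go [u] fuel l cur acc
        = acc.reverse ++ pvConsHead cur.reverse (pvSplitChar u l) := by
  intro fuel
  induction fuel with
  | zero => intro l cur acc h; omega
  | succ n ih =>
    intro l cur acc h
    cases l with
    | nil => simp [PySem.Chars.splitOn.go, pvSplitChar, pvConsHead]
    | cons c t =>
      simp only [List.length_cons] at h
      by_cases hc : c = u
      · subst hc
        have hpre : [c].isPrefixOf (c :: t) = true := by simp [List.isPrefixOf]
        simp only [PySem.Chars.splitOn.go, hpre, if_true, List.length_singleton, List.drop_one,
          List.tail_cons]
        rw [ih t [] (cur.reverse :: acc) (by omega)]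
        rw [List.reverse_nil, pvConsHead_nil _ (pvSplitChar_ne_nil c t)]
        simp [pvSplitChar, pvConsHead]
      · have hpre : [u].isPrefixOf (c :: t) = false := by
          simp only [List.isPrefixOf, Bool.and_true, beq_eq_false_iff_ne, ne_eq]
          exact fun h' => hc h'.symm
        simp only [PySem.Chars.splitOn.go, hpre, Bool.false_eq_true, if_false]
        rw [ih t (c :: cur) acc (by omega)]
        have : pvConsHead (c :: cur).reverse (pvSplitChar u t)
            = pvConsHead cur.reverse (pvSplitChar u (c :: t)) := by
          cases hsp : pvSplitChar u t with
          | nil => exact absurd hsp (pvSplitChar_ne_nil u t)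
          | cons hh tt => simp [pvConsHead, pvSplitChar, hc, hsp]
        rw [this]

lemma splitOn_single (u : Char) (s : List Char) :
    PySem.Chars.splitOn s [u] = pvSplitChar u s := by
  have h := splitOn_go_single u (s.length + 1) s [] [] (by omega)
  simpa [PySem.Chars.splitOn, pvConsHead_nil _ (pvSplitChar_ne_nil u s)] using h

-- main structural lemma: filter-nonempty of the single-char split of the mapped list = the tokenizer
lemma tok_main : ∀ (cs buf : List Char),
    ((pvConsHead buf (pvSplitChar '_' (cs.map pvMapG))).map String.ofList).filter
        (fun item => !item.isEmpty)
      = pvTok cs buf := by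
  intro cs
  induction cs with
  | nil =>
    intro buf
    cases buf <;> simp [pvSplitChar, pvConsHead, pvTok, String.isEmpty, String.ofList]
  | cons c rest ih =>
    intro buf
    by_cases hd : pvIsDelim c
    · have hg : pvMapG c = '_' := by simp [pvMapG, hd]
      simp only [List.map_cons, hg, pvSplitChar, pvConsHead, List.append_nil,
        List.map_cons, List.filter_cons, pvTok, hd, if_true]
      rw [← pvConsHead_nil _ (pvSplitChar_ne_nil '_' (rest.map pvMapG)), ih []]
      cases buf with
      | nil => simp
      | cons b bt => simp [String.isEmpty, String.ofList]
    · have hg : pvMapG c = c := by simp [pvMapG, hd]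
      have hne : c ≠ '_' := by
        intro h; subst h; simp [pvIsDelim] at hd
      simp only [List.map_cons, hg, pvSplitChar, if_neg hne]
      have : pvConsHead buf ((pvSplitChar '_' (rest.map pvMapG)).modifyHead (c :: ·))
          = pvConsHead (buf ++ [c]) (pvSplitChar '_' (rest.map pvMapG)) := by
        cases hsp : pvSplitChar '_' (rest.map pvMapG) with
        | nil => exact absurd hsp (pvSplitChar_ne_nil _ _)
        | cons hh tt => simp [pvConsHead]
      rw [this, ih (buf ++ [c])]
      simp [pvTok, hd]

-- A's replace-chain over "/?#&$" is the map by pvMapG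
lemma replace_chain (s : List Char) :
    (("/?#&$".toList).foldl (fun t c => PySem.Chars.replace t [c] ['_']) s)
      = s.map pvMapG := by
  have h : "/?#&$".toList = ['/', '?', '#', '&', '$'] := by decide
  rw [h]
  simp only [List.foldl_cons, List.foldl_nil, replace_single, List.map_map]
  apply List.map_congr_left
  intro c _
  simp only [Function.comp, pvMapG, pvIsDelim]
  by_cases h1 : c = '/' <;> by_cases h2 : c = '?' <;> by_cases h3 : c = '#' <;>
    by_cases h4 : c = '&' <;> by_cases h5 : c = '$' <;> simp_all

lemma strfold (cs : List Char) : ∀ (s : String),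
    (cs.foldl (fun t c => PySem.Str.replace t (String.ofList [c]) "_") s).toList
      = cs.foldl (fun t c => PySem.Chars.replace t [c] ['_']) s.toList := by
  induction cs with
  | nil => intro s; rfl
  | cons c rest ih =>
    intro s
    simp only [List.foldl_cons]
    rw [ih]
    congr 1
    rw [PySem.Str.toList_replace]
    simp

-- ===== VERDICT (by name: the statement is the Claim_ definition above) =====
theorem sequenceFinder_spec : Claim_equal_sequenceFinder := by
  intro string key _
  unfold Spec_sequenceFinder
  simp only [sequenceFinder, sequenceFinder_alt]
  generalize PySem.Str.slice string (some 0) (some (PySem.Str.find string key - 1)) = s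
  have hsplit : PySem.Str.split? (("/?#&$".toList).foldl
        (fun t c => PySem.Str.replace t (String.ofList [c]) "_") s) "_"
      = some ((pvSplitChar '_' (s.toList.map pvMapG)).map String.ofList) := by
    rw [PySem.Str.split?, strfold, replace_chain]
    simp [PySem.Chars.split?, splitOn_single]
  rw [hsplit, Option.getD_some]
  have h := tok_main s.toList []
  rwa [pvConsHead_nil _ (pvSplitChar_ne_nil _ _)] at h
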